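-- pv_equiv track=rewrite | github.com/Arnarsson/DroneTest2 | ingestion/consolidator.py | recalculate_evidence_score
-- ===== SOURCE A (Python) =====
-- from typing import List, Dict, Tuple
--
-- def recalculate_evidence_score(sources: List[Dict]) -> int:
--     """
--     Recalculate evidence score based on combined sources
--
--     Rules (from constants/evidence.ts):
--     - ANY trust_weight 4 source → score 4 (OFFICIAL)
--     - 2+ trust_weight ≥2 sources → score 3 (VERIFIED - multi-source)
--     - Single trust_weight ≥2 → score 2 (REPORTED)
--     - Low trust → score 1 (UNCONFIRMED)
--
--     Example:
--         [BT (trust_weight: 2)] → score 2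
--         [BT (trust_weight: 2), DR (trust_weight: 2)] → score 3 (upgraded!)
--         [BT (trust_weight: 2), Police (trust_weight: 4)] → score 4
--
--     Args:
--         sources: List of source dicts with trust_weight field
--
--     Returns:
--         Evidence score (1-4)
--     """
--     if not sources:
--         return 1
--
--     # Tier 4: ANY official source (police, military, NOTAM, aviation authority)
--     max_trust = max([s.get('trust_weight', 1) for s in sources])
--     if max_trust >= 4:
--         return 4
--
--     # Tier 3: Multiple credible sources (trust_weight ≥ 2)
--     credible_sources = [s for s in sources if s.get('trust_weight', 0) >= 2]
--     if len(credible_sources) >= 2: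
--         return 3  # Multi-source verification upgrade
--
--     # Tier 2: Single credible source
--     if max_trust >= 2:
--         return 2
--
--     # Tier 1: Low trust sources only
--     return 1
-- ===== SOURCE B (Python) =====
-- def recalculate_evidence_score(sources):
--     official = 0
--     credible = 0
--     for s in sources:
--         w = s.get('trust_weight', 0)
--         if w >= 4:
--             official += 1
--         if w >= 2:
--             credible += 1
--     if official >= 1:
--         return 4
--     if credible >= 2:
--         return 3
--     if credible >= 1:
--         return 2
--     return 1
-- ===== Notes on version B (the rewrite author's own statement) =====
-- stated objective: simpler
-- what changed: Replaces the max-over-list plus filter-then-len with a single pass maintaining two counters (official >= 4, credible >= 2) and branches purely on the counts; no max value and no intermediate lists are kept.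
import Mathlib
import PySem

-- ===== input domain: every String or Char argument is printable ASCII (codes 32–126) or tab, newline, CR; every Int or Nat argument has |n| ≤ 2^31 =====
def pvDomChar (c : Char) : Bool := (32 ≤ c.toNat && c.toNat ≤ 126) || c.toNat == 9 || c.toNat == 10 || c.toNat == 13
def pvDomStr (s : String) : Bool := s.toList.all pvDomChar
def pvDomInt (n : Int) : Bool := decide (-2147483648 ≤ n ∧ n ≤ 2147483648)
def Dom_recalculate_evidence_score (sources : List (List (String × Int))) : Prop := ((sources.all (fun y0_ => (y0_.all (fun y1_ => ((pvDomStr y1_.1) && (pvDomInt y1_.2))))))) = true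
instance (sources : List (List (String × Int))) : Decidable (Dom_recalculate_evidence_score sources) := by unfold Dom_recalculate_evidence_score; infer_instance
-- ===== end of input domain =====

-- B replaces A's max-over-list plus filter-then-len with a single pass keeping two counters; objective: simpler.


-- ===== PORT A =====
def recalculate_evidence_score (sources : List (List (String × Int))) : Int :=
  if sources = [] then 1
  else
    let maxTrust : Int :=
      ((PySem.List.max? (sources.map (fun s => (PySem.Dict.mk s).getD "trust_weight" 1))
          (fun x => x)).getD 1)
    if maxTrust ≥ 4 then 4
    else
      let credible := sources.filter (fun s => (PySem.Dict.mk s).getD "trust_weight" 0 ≥ 2)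
      if (credible.length : Int) ≥ 2 then 3
      else if maxTrust ≥ 2 then 2
      else 1

-- ===== PORT B =====
def recalculate_evidence_score_alt (sources : List (List (String × Int))) : Int :=
  let oc : Int × Int := sources.foldl
    (fun (oc : Int × Int) s =>
      let w := (PySem.Dict.mk s).getD "trust_weight" 0
      ((if w ≥ 4 then oc.1 + 1 else oc.1), (if w ≥ 2 then oc.2 + 1 else oc.2)))
    (0, 0)
  if oc.1 ≥ 1 then 4
  else if oc.2 ≥ 2 then 3
  else if oc.2 ≥ 1 then 2
  else 1

-- ===== PRECONDITION & SPEC =====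
def Spec_recalculate_evidence_score (sources : List (List (String × Int))) (out : Int) : Prop := out = recalculate_evidence_score_alt sources
instance (sources : List (List (String × Int))) (out : Int) : Decidable (Spec_recalculate_evidence_score sources out) := by unfold Spec_recalculate_evidence_score; infer_instance

-- ===== CLAIM (what is proved, stated in full; the proofs are below) =====
def Claim_equal_recalculate_evidence_score : Prop := ∀ (sources : List (List (String × Int))), Dom_recalculate_evidence_score sources → Spec_recalculate_evidence_score sources (recalculate_evidence_score sources)

-- ===== LEMMAS AND PROOFS =====

-- the credibility test with default 0 or default 1 agree at thresholds ≥ 2 (both defaults are < 2)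
theorem getD_ge_iff (s : List (String × Int)) (c : Int) (hc : 2 ≤ c) :
    ((PySem.Dict.mk s).getD "trust_weight" 1 ≥ c ↔ (PySem.Dict.mk s).getD "trust_weight" 0 ≥ c) := by
  simp only [PySem.Dict.getD_eq_get?_getD]
  cases (PySem.Dict.mk s).get? "trust_weight" with
  | none => simp; omega
  | some v => simp

-- B's fold computes the two countP's (as integers)
theorem fold_counts (sources : List (List (String × Int))) (a b : Int) :
    sources.foldl
      (fun (oc : Int × Int) s =>
        let w := (PySem.Dict.mk s).getD "trust_weight" 0
        ((if w ≥ 4 then oc.1 + 1 else oc.1), (if w ≥ 2 then oc.2 + 1 else oc.2)))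
      (a, b)
    = (a + (sources.countP (fun s => decide ((PySem.Dict.mk s).getD "trust_weight" 0 ≥ 4)) : Int),
       b + (sources.countP (fun s => decide ((PySem.Dict.mk s).getD "trust_weight" 0 ≥ 2)) : Int)) := by
  induction sources generalizing a b with
  | nil => simp
  | cons h t ih =>
    simp only [List.foldl_cons, List.countP_cons, ih]
    by_cases h4 : (PySem.Dict.mk h).getD "trust_weight" 0 ≥ 4 <;>
      by_cases h2 : (PySem.Dict.mk h).getD "trust_weight" 0 ≥ 2 <;>
        simp [h4, h2, Prod.ext_iff] <;> omega

-- the nonempty max with default-1 dominates threshold c ≥ 2 iff some element does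
theorem max_ge_iff (l : List Int) (hne : l ≠ []) (c : Int) (_ : 2 ≤ c) :
    (((PySem.List.max? l (fun x => x)).getD 1 ≥ c) ↔ ∃ x ∈ l, x ≥ c) := by
  cases hm : PySem.List.max? l (fun x => x) with
  | none => exact absurd ((PySem.List.max?_eq_none_iff l (fun x => x)).mp hm) hne
  | some m =>
    simp only [Option.getD_some]
    constructor
    · intro h; exact ⟨m, PySem.List.max?_mem hm, h⟩
    · rintro ⟨x, hx, hxc⟩
      have := PySem.List.max?_isMax hm x hx
      omega

-- countP positivity ↔ existence
theorem countP_pos_iff (sources : List (List (String × Int))) (p : List (String × Int) → Bool) :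
    ((1 : Int) ≤ (sources.countP p : Int) ↔ ∃ s ∈ sources, p s = true) := by
  rw [show ((1 : Int) ≤ (sources.countP p : Int)) ↔ 0 < sources.countP p by omega]
  exact List.countP_pos_iff

-- ===== VERDICT (by name: the statement is the Claim_ definition above) =====
theorem recalculate_evidence_score_spec : Claim_equal_recalculate_evidence_score := by
  intro sources _
  unfold Spec_recalculate_evidence_score recalculate_evidence_score recalculate_evidence_score_alt
  rw [fold_counts]
  simp only [zero_add]
  set c4 := (sources.countP (fun s => decide ((PySem.Dict.mk s).getD "trust_weight" 0 ≥ 4)) : Int) with hc4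
  set c2 := (sources.countP (fun s => decide ((PySem.Dict.mk s).getD "trust_weight" 0 ≥ 2)) : Int) with hc2
  by_cases hne : sources = []
  · subst hne; simp [hc4, hc2]
  · simp only [if_neg hne]
    have hmap : sources.map (fun s => (PySem.Dict.mk s).getD "trust_weight" 1) ≠ [] := by
      simpa using hne
    have h4 : ((PySem.List.max? (sources.map (fun s => (PySem.Dict.mk s).getD "trust_weight" 1)) (fun x => x)).getD 1 ≥ 4)
        ↔ (1 ≤ c4) := by
      rw [max_ge_iff _ hmap 4 (by norm_num), hc4, countP_pos_iff]
      simp only [List.mem_map]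
      constructor
      · rintro ⟨x, ⟨s, hs, rfl⟩, hx⟩
        exact ⟨s, hs, by simpa using (getD_ge_iff s 4 (by norm_num)).mp hx⟩
      · rintro ⟨s, hs, hp⟩
        exact ⟨_, ⟨s, hs, rfl⟩, (getD_ge_iff s 4 (by norm_num)).mpr (by simpa using hp)⟩
    have h2 : ((PySem.List.max? (sources.map (fun s => (PySem.Dict.mk s).getD "trust_weight" 1)) (fun x => x)).getD 1 ≥ 2)
        ↔ (1 ≤ c2) := by
      rw [max_ge_iff _ hmap 2 (by norm_num), hc2, countP_pos_iff]
      simp only [List.mem_map]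
      constructor
      · rintro ⟨x, ⟨s, hs, rfl⟩, hx⟩
        exact ⟨s, hs, by simpa using (getD_ge_iff s 2 (by norm_num)).mp hx⟩
      · rintro ⟨s, hs, hp⟩
        exact ⟨_, ⟨s, hs, rfl⟩, (getD_ge_iff s 2 (by norm_num)).mpr (by simpa using hp)⟩
    have hlen : ((sources.filter (fun s => (PySem.Dict.mk s).getD "trust_weight" 0 ≥ 2)).length : Int) = c2 := by
      rw [hc2, List.countP_eq_length_filter]
    by_cases H4 : (1 : Int) ≤ c4
    · simp [h4.mpr H4, H4]
    · have : ¬ ((PySem.List.max? (sources.map (fun s => (PySem.Dict.mk s).getD "trust_weight" 1)) (fun x => x)).getD 1 ≥ 4) := by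
        intro h; exact H4 (h4.mp h)
      simp only [if_neg this, if_neg H4]
      by_cases H2 : (2 : Int) ≤ c2
      · simp [hlen, H2]
      · simp only [hlen, if_neg H2]
        by_cases H1 : (1 : Int) ≤ c2
        · simp [h2.mpr H1, H1]
        · have : ¬ ((PySem.List.max? (sources.map (fun s => (PySem.Dict.mk s).getD "trust_weight" 1)) (fun x => x)).getD 1 ≥ 2) := by
            intro h; exact H1 (h2.mp h)
          simp [this, H1]
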